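-- pv_equiv track=rewrite | github.com/SnooozeCode/studiohub | src/studiohub/ui/views/log_viewer.py | _filter_current_session
-- ===== SOURCE A (Python) =====
-- def _filter_current_session(lines: list[str]) -> list[str]:
--     """Filter lines to only show current session."""
--     if not lines:
--         return lines
--
--     # Find the most recent session start marker
--     session_start_idx = -1
--     for i, line in enumerate(lines):
--         if "StudioHub starting up" in line or "Starting StudioHub" in line:
--             session_start_idx = i
--
--     if session_start_idx >= 0:
--         # Return all lines from session start to end
--         return lines[session_start_idx:]
--     else:
--         # If no session marker found, assume last 1000 lines is current session
--         return lines[-1000:]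
-- ===== SOURCE B (Python) =====
-- def _filter_current_session(lines: list[str]) -> list[str]:
--     """Filter lines to only show current session."""
--     if not lines:
--         return lines
--     # Build the current session back-to-front: walk the log in reverse,
--     # collecting lines until (and including) the most recent session marker.
--     out = []
--     found = False
--     for line in reversed(lines):
--         out.append(line)
--         if "StudioHub starting up" in line or "Starting StudioHub" in line:
--             found = True
--             break
--     if not found:
--         # No session marker found: assume last 1000 lines is current session
--         out = out[:1000]
--     out.reverse()
--     return out
-- ===== Notes on version B (the rewrite author's own statement) =====
-- stated objective: alternative
-- what changed: Instead of locating a marker index and slicing the input, B constructs the result list itself back-to-front: it walks the log in reverse appending lines to an accumulator, stops at the first marker seen, truncates to 1000 if none was found, and reverses the accumulator -- no index arithmetic or slicing of the input.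
import Mathlib
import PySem

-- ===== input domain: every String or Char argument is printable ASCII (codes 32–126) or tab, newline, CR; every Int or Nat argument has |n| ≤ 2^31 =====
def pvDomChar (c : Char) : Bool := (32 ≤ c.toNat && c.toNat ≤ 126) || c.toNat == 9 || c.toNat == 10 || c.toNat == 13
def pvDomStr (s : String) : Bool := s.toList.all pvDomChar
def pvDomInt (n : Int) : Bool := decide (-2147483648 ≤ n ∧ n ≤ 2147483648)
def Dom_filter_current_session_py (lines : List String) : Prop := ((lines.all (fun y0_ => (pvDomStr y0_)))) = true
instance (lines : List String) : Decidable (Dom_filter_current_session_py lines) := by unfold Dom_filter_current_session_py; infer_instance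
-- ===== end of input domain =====

-- B builds the current session back-to-front (reverse walk accumulating lines, stop at first
-- marker, truncate to 1000 if none, then reverse) instead of A's index scan plus slice (alternative; same O(n) cost).


-- ===== PORT A =====
-- '"StudioHub starting up" in line or "Starting StudioHub" in line'
def pvMarker (line : String) : Bool :=
  PySem.Str.isIn "StudioHub starting up" line || PySem.Str.isIn "Starting StudioHub" line

def filter_current_session_py (lines : List String) : List String :=
  if lines = [] then lines
  else
    let session_start_idx : Int :=
      (PySem.List.enumerate lines).foldl
        (fun acc p => if pvMarker p.2 then p.1 else acc) (-1)
    if 0 ≤ session_start_idx then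
      PySem.List.slice lines (some session_start_idx) none
    else
      PySem.List.slice lines (some (-1000)) none

-- ===== PORT B =====
-- Source B's 'for line in reversed(lines): out.append(line); if marker: found = True; break'
-- returns (out, found)
def pvBLoop : List String → List String → List String × Bool
  | [], out => (out, false)
  | l :: rest, out =>
    if pvMarker l then (out ++ [l], true) else pvBLoop rest (out ++ [l])

def filter_current_session_py_alt (lines : List String) : List String :=
  if lines = [] then lines
  else
    let r := pvBLoop lines.reverse []
    let out := if r.2 then r.1 else r.1.take 1000   -- 'if not found: out = out[:1000]'
    out.reverse                                     -- 'out.reverse(); return out'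

-- ===== PRECONDITION & SPEC =====
def Spec_filter_current_session_py (lines : List String) (out : List String) : Prop := out = filter_current_session_py_alt lines
instance (lines : List String) (out : List String) : Decidable (Spec_filter_current_session_py lines out) := by unfold Spec_filter_current_session_py; infer_instance

-- ===== CLAIM (what is proved, stated in full; the proofs are below) =====
def Claim_equal_filter_current_session_py : Prop := ∀ (lines : List String), Dom_filter_current_session_py lines → Spec_filter_current_session_py lines (filter_current_session_py lines)

-- ===== LEMMAS AND PROOFS =====

-- A's fold over the first n lines
def pvFoldN (lines : List String) (n : Nat) : Int :=
  (PySem.List.enumerate (lines.take n)).foldl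
    (fun acc p => if pvMarker p.2 then p.1 else acc) (-1)

theorem pvFoldN_succ (lines : List String) (n : Nat) (h : n < lines.length) :
    pvFoldN lines (n+1) = if pvMarker lines[n] then (n : Int) else pvFoldN lines n := by
  unfold pvFoldN
  rw [List.take_add_one, List.getElem?_eq_getElem h, Option.toList_some,
    PySem.List.enumerate_append, List.foldl_append]
  simp [List.length_take, Nat.min_eq_left h.le]

theorem pvFoldN_lt (lines : List String) (n : Nat) (h : n ≤ lines.length) :
    pvFoldN lines n < (n : Int) := by
  induction n with
  | zero => simp [pvFoldN]
  | succ n ih =>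
    rw [pvFoldN_succ lines n h]
    split
    · omega
    · have := ih (Nat.le_of_lt h)
      omega

-- the reverse walk over the first n lines, setting i := (pvFoldN lines n).toNat
theorem pvBLoop_eq (lines : List String) (n : Nat) (h : n ≤ lines.length) (out : List String) :
    pvBLoop ((lines.take n).reverse) out =
      if 0 ≤ pvFoldN lines n then
        (out ++ ((lines.drop (pvFoldN lines n).toNat).take (n - (pvFoldN lines n).toNat)).reverse, true)
      else (out ++ (lines.take n).reverse, false) := by
  induction n generalizing out with
  | zero => simp [pvFoldN, pvBLoop]
  | succ n ih =>
    have hn : n < lines.length := h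
    rw [List.take_add_one, List.getElem?_eq_getElem hn, Option.toList_some,
      List.reverse_append, pvFoldN_succ lines n hn]
    simp only [List.reverse_cons, List.reverse_nil, List.nil_append, List.singleton_append]
    show pvBLoop (lines[n] :: (lines.take n).reverse) out = _
    by_cases hm : pvMarker lines[n]
    · simp only [pvBLoop, hm, if_pos trivial]
      have h0 : (0:Int) ≤ (n:Int) := Int.natCast_nonneg n
      rw [if_pos h0]
      have : (lines.drop ((n:Int).toNat)).take (n + 1 - (n:Int).toNat) = [lines[n]] := by
        simp only [Int.toNat_natCast, Nat.add_sub_cancel_left]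
        rw [List.take_one, List.head?_drop, List.getElem?_eq_getElem hn]
        rfl
      rw [this]
      simp
    · simp only [pvBLoop, hm, Bool.false_eq_true, if_false]
      rw [ih (Nat.le_of_lt hn) (out ++ [lines[n]])]
      by_cases hpos : 0 ≤ pvFoldN lines n
      · rw [if_pos hpos, if_pos hpos]
        set i := (pvFoldN lines n).toNat with hi
        have hilt : i < n := by
          have := pvFoldN_lt lines n (Nat.le_of_lt hn)
          omega
        have hstep : (lines.drop i).take (n + 1 - i) = (lines.drop i).take (n - i) ++ [lines[n]] := by
          have : n + 1 - i = (n - i) + 1 := by omega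
          rw [this, List.take_add_one]
          have : (lines.drop i)[n - i]? = some lines[n] := by
            rw [List.getElem?_drop]
            have : i + (n - i) = n := by omega
            rw [this, List.getElem?_eq_getElem hn]
          rw [this]
          rfl
        rw [hstep]
        simp
      · rw [if_neg hpos, if_neg hpos]
        simp
    
-- ===== VERDICT (by name: the statement is the Claim_ definition above) =====
theorem filter_current_session_py_spec : Claim_equal_filter_current_session_py := by
  intro lines _
  unfold Spec_filter_current_session_py filter_current_session_py filter_current_session_py_alt
  by_cases hnil : lines = []
  · simp [hnil]
  · simp only [hnil, if_false]
    have hrev : lines.reverse = (lines.take lines.length).reverse := by rw [List.take_length]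
    rw [hrev, pvBLoop_eq lines lines.length le_rfl []]
    have hA : (PySem.List.enumerate lines).foldl
        (fun acc p => if pvMarker p.2 then p.1 else acc) (-1) = pvFoldN lines lines.length := by
      unfold pvFoldN; rw [List.take_length]
    simp only [hA]
    by_cases hpos : 0 ≤ pvFoldN lines lines.length
    · rw [if_pos hpos]
      set i := (pvFoldN lines lines.length).toNat with hi
      have hfull : (lines.drop i).take (lines.length - i) = lines.drop i := by
        apply List.take_of_length_le
        simp
      rw [PySem.List.slice_from _ hpos, hfull]
      simp [hpos]
      rw [hi]
    · rw [if_neg hpos]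
      rw [PySem.List.slice_from_neg_ofNat lines 1000 (by norm_num)]
      simp only [hpos, if_false, List.take_length, Bool.false_eq_true, List.nil_append]
      rw [List.take_reverse]; simp
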